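-- pv_equiv track=rewrite | github.com/edtbl76/python-hive | pythonProject/Algorithms/rabin_karp_algorithm_2.py | rabin_karp_algorithm_2D
-- ===== SOURCE A (Python) =====
-- def polynomial_hash(s):
--     hash_value = 0
--     for i in range(len(s)):
--         hash_value += (ord(s[i]) * (26 ** (len(s) - i - 1)))
--     return hash_value
--
-- def polynomial_rolling_hash(previous_hash, c1, c2, pattern_length):
--     return (previous_hash - ord(c1) * (26 ** (pattern_length - 1))) * 26 + ord(c2)
--
-- def rabin_karp_algorithm_2D(pattern, text):
--     # helpers
--     m1 = len(pattern)
--     m2 = len(pattern[0])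
--     n1 = len(text)
--     n2 = len(text[0])
--     occurrences = 0
--
--     # combines individual 1D polynomial hash values of each row to use a
--     # polynomial function.
--     pattern_hash = 0
--     for i in range(m1):
--         pattern_hash += polynomial_hash(pattern[i]) * (10**(m1 - i - 1))
--
--
--     all_hashes = [[0 for j in range(n2 - m2 + 1)] for i in range(n1)]
--     for i in range(n1):
--         substring_hash = polynomial_hash(text[i][:m2])
--         all_hashes[i][0] = substring_hash
--
--         for j in range(n2 - m2):
--             previous_hash = substring_hash
--             substring_hash = polynomial_rolling_hash(previous_hash, text[i][j], text[i][j + m2], m2)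
--             all_hashes[i][j + 1] = substring_hash
--
--
--     for j in range(n2 - m2 + 1):
--         column_hash = 0
--         for i in range(m1):
--             column_hash += all_hashes[i][j] * (10**(m1 - i - 1))
--         if column_hash == pattern_hash:
--             occurrences += 1
--
--         for i in range(n1 - m1):
--             previous_hash = column_hash
--             column_hash = (previous_hash - all_hashes[i][j]*(10**(m1 - 1)))*10 + all_hashes[i + m1][j]
--             if column_hash == pattern_hash:
--                 occurrences += 1
--     return occurrences
--
-- pattern = ['ABC', 'GHI']
--
-- text = ['ABCDEF', 'GHIJKL', 'MNOPQR', 'STUVWX', 'YZABCD', 'EFGHIJ', 'KLMNOP']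
-- ===== SOURCE B (Python) =====
-- def rabin_karp_algorithm_2D(pattern, text):
--     # Direct recomputation: hash every window from scratch (Horner rule over the
--     # window's characters), no rolling hashes and no all_hashes table.
--     def horner_hash(s):
--         h = 0
--         for c in s:
--             h = h * 26 + ord(c)
--         return h
--
--     m1 = len(pattern)
--     m2 = len(pattern[0])
--     n1 = len(text)
--     n2 = len(text[0])
--
--     target = 0
--     for k in range(m1):
--         target += horner_hash(pattern[k]) * 10 ** (m1 - k - 1)
--
--     occurrences = 0
--     for i in range(n1 - m1 + 1):
--         for j in range(n2 - m2 + 1):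
--             h = 0
--             for k in range(m1):
--                 row_hash = 0
--                 for q in range(m2):
--                     row_hash = row_hash * 26 + ord(text[i + k][j + q])
--                 h += row_hash * 10 ** (m1 - k - 1)
--             if h == target:
--                 occurrences += 1
--     return occurrences
-- ===== Notes on version B (the rewrite author's own statement) =====
-- stated objective: simpler
-- what changed: Replaces the rolling-hash machinery (all_hashes table, row and column rolling updates) by recomputing each window's combined hash from scratch with a Horner-rule hash over the window's characters, compared directly to the pattern hash.
-- outside the precondition, e.g. on rabin_karp_algorithm_2D([''], ['AB']): A returns 2, B returns 3; on rabin_karp_algorithm_2D(['AB'], ['AB', 'A']): A returns 1, B raises IndexError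
import Mathlib
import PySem

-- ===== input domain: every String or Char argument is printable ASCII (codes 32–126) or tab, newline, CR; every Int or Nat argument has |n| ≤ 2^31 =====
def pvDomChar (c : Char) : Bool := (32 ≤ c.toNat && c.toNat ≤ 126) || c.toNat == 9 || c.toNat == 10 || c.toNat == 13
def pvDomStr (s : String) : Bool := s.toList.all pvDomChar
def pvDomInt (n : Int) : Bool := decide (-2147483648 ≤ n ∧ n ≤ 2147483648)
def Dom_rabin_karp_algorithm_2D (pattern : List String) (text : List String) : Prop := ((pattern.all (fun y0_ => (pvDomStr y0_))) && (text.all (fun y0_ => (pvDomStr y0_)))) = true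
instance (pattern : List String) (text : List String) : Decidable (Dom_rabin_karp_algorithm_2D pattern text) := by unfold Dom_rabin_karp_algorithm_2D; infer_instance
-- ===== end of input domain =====

-- B replaces A's rolling-hash machinery (all_hashes table, row/column rolling updates)
-- by recomputing each window's combined hash from scratch with a Horner-rule row hash
-- (objective: simpler; not claimed faster).

-- ===== PORT A =====
def pvOrd (c : Char) : Int := (c.toNat : Int)

def polynomial_hash (s : List Char) : Int :=
  (List.range s.length).foldl
    (fun h i => h + pvOrd (s.getD i ' ') * (26 : Int) ^ (s.length - i - 1)) 0

def polynomial_rolling_hash (previous_hash : Int) (c1 c2 : Char) (pattern_length : Nat) : Int :=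
  (previous_hash - pvOrd c1 * (26 : Int) ^ (pattern_length - 1)) * 26 + pvOrd c2

def rabin_karp_algorithm_2D (pattern : List String) (text : List String) : Int :=
  let m1 := pattern.length
  let m2 := (pattern.getD 0 "").length
  let n1 := text.length
  let n2 := (text.getD 0 "").length
  let pattern_hash := (List.range m1).foldl
    (fun h i => h + polynomial_hash (pattern.getD i "").toList * (10 : Int) ^ (m1 - i - 1)) 0
  let all_hashes : List (List Int) :=
    (List.range n1).map (fun _ => (List.range (n2 - m2 + 1)).map (fun _ => (0 : Int)))
  let all_hashes := (List.range n1).foldl (fun ah i =>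
    let ti := (text.getD i "").toList
    let substring_hash := polynomial_hash (ti.take m2)
    let row := (ah.getD i []).set 0 substring_hash
    let rs := (List.range (n2 - m2)).foldl (fun (rs : List Int × Int) j =>
      let sh := polynomial_rolling_hash rs.2 (ti.getD j ' ') (ti.getD (j + m2) ' ') m2
      (rs.1.set (j + 1) sh, sh)) (row, substring_hash)
    ah.set i rs.1) all_hashes
  (List.range (n2 - m2 + 1)).foldl (fun occurrences j =>
    let column_hash := (List.range m1).foldl
      (fun ch i => ch + ((all_hashes.getD i []).getD j 0) * (10 : Int) ^ (m1 - i - 1)) 0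
    let occurrences := if column_hash = pattern_hash then occurrences + 1 else occurrences
    let oc := (List.range (n1 - m1)).foldl (fun (oc : Int × Int) i =>
      let ch := (oc.2 - ((all_hashes.getD i []).getD j 0) * (10 : Int) ^ (m1 - 1)) * 10
                + ((all_hashes.getD (i + m1) []).getD j 0)
      (if ch = pattern_hash then oc.1 + 1 else oc.1, ch)) (occurrences, column_hash)
    oc.1) 0

-- ===== PORT B =====
def horner_hash (s : List Char) : Int := s.foldl (fun h c => h * 26 + pvOrd c) 0

def rabin_karp_algorithm_2D_alt (pattern : List String) (text : List String) : Int :=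
  let m1 := pattern.length
  let m2 := (pattern.getD 0 "").length
  let n1 := text.length
  let n2 := (text.getD 0 "").length
  let target := (List.range m1).foldl
    (fun h k => h + horner_hash (pattern.getD k "").toList * (10 : Int) ^ (m1 - k - 1)) 0
  (List.range (n1 - m1 + 1)).foldl (fun occurrences i =>
    (List.range (n2 - m2 + 1)).foldl (fun occurrences j =>
      let h := (List.range m1).foldl
        (fun h k =>
          h + (List.range m2).foldl
                (fun row_hash q => row_hash * 26 + pvOrd ((text.getD (i + k) "").toList.getD (j + q) ' '))
                0
              * (10 : Int) ^ (m1 - k - 1)) 0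
      if h = target then occurrences + 1 else occurrences) occurrences) 0

-- ===== PRECONDITION & SPEC =====
-- Pre_ excludes: empty pattern/text, a pattern taller or wider than the text, and text
-- rows shorter than the first row (there A raises IndexError, or returns while B's
-- per-window character indexing raises IndexError on the short row); and zero-width
-- pattern rows with nonempty text rows, where A's 26**(m2-1) is a float and the
-- returned count is an artefact of float rounding.
def Pre_rabin_karp_algorithm_2D (pattern : List String) (text : List String) : Prop :=
  pattern ≠ [] ∧ text ≠ [] ∧ pattern.length ≤ text.length ∧
  (pattern.getD 0 "").length ≤ (text.getD 0 "").length ∧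
  (∀ s ∈ text, (text.getD 0 "").length ≤ s.length) ∧
  (1 ≤ (pattern.getD 0 "").length ∨ (text.getD 0 "").length = 0)

instance (pattern : List String) (text : List String) :
    Decidable (Pre_rabin_karp_algorithm_2D pattern text) := by
  unfold Pre_rabin_karp_algorithm_2D; infer_instance

def pvWitness_rabin_karp_algorithm_2D : List String × List String := (["AB"], ["AB", "CD"])

def Spec_rabin_karp_algorithm_2D (pattern : List String) (text : List String) (out : Int) : Prop :=
  out = rabin_karp_algorithm_2D_alt pattern text
instance (pattern : List String) (text : List String) (out : Int) :
    Decidable (Spec_rabin_karp_algorithm_2D pattern text out) := by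
  unfold Spec_rabin_karp_algorithm_2D; infer_instance

-- ===== CLAIM =====
def Claim_equal_rabin_karp_algorithm_2D : Prop :=
  ∀ (pattern : List String) (text : List String),
    Dom_rabin_karp_algorithm_2D pattern text →
    Pre_rabin_karp_algorithm_2D pattern text →
    Spec_rabin_karp_algorithm_2D pattern text (rabin_karp_algorithm_2D pattern text)

-- ===== LEMMAS AND PROOFS =====

/-- Positional polynomial value of a list of ints in base `b`. -/
def hsg (b : Int) : List Int → Int
  | [] => 0
  | x :: t => x * b ^ t.length + hsg b t

theorem hsg_append (b : Int) (u : List Int) (y : Int) :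
    hsg b (u ++ [y]) = b * hsg b u + y := by
  induction u with
  | nil => simp [hsg]
  | cons x t ih => simp [hsg, ih]; ring

/-- Rolling-hash identity for a width-`m` window of `g` in base `b`. -/
theorem hsg_roll (b : Int) (g : Nat → Int) (m : Nat) (hm : 1 ≤ m) (i : Nat) :
    hsg b ((List.range m).map (fun k => g (i + 1 + k)))
      = (hsg b ((List.range m).map (fun k => g (i + k))) - g i * b ^ (m - 1)) * b + g (i + m) := by
  obtain ⟨m', rfl⟩ : ∃ m', m = m' + 1 := ⟨m - 1, by omega⟩
  have h1 : (List.range (m' + 1)).map (fun k => g (i + k))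
      = g i :: (List.range m').map (fun k => g (i + 1 + k)) := by
    rw [List.range_succ_eq_map, List.map_cons, List.map_map]
    congr 1
    apply List.map_congr_left
    intro a _
    show g (i + Nat.succ a) = g (i + 1 + a)
    congr 1
    omega

  have h2 : (List.range (m' + 1)).map (fun k => g (i + 1 + k))
      = (List.range m').map (fun k => g (i + 1 + k)) ++ [g (i + 1 + m')] := by
    rw [List.range_succ, List.map_append]
    simp
  have h3 : i + 1 + m' = i + (m' + 1) := by omega
  rw [h1, h2, hsg_append, h3]
  simp [hsg]
  ring

/-- The port's indexed summation fold computes `hsg`. -/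
theorem foldl_hsg (b : Int) :
    ∀ (n : Nat) (g : Nat → Int) (a : Int),
      (List.range n).foldl (fun h i => h + g i * b ^ (n - i - 1)) a
        = a + hsg b ((List.range n).map g) := by
  intro n
  induction n with
  | zero => intro g a; simp [hsg]
  | succ n ih =>
    intro g a
    rw [List.range_succ_eq_map, List.foldl_cons, List.foldl_map]
    have h0 : (List.range n).foldl (fun h i => h + g (i + 1) * b ^ (n + 1 - (i + 1) - 1))
            (a + g 0 * b ^ (n + 1 - 0 - 1))
        = (List.range n).foldl (fun h i => h + (g ∘ Nat.succ) i * b ^ (n - i - 1))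
            (a + g 0 * b ^ n) := by
      congr 1
      funext h i
      have he : n + 1 - (i + 1) - 1 = n - i - 1 := by omega
      simp only [Function.comp_apply, Nat.succ_eq_add_one, he]
    rw [h0, ih, List.map_cons, List.map_map]
    simp [hsg]
    ring

theorem polynomial_hash_eq (s : List Char) :
    polynomial_hash s = hsg 26 (s.map pvOrd) := by
  unfold polynomial_hash
  rw [foldl_hsg]
  have : (List.range s.length).map (fun i => pvOrd (s.getD i ' ')) = s.map pvOrd := by
    apply List.ext_getElem
    · simp
    · intro n h1 h2
      simp at h1 ⊢
      congr 1
      rw [List.getElem?_eq_getElem (by simpa using h1)]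
      rfl
  rw [this]
  ring

theorem horner_aux (s : List Char) : ∀ (a : Int),
    s.foldl (fun h c => h * 26 + pvOrd c) a = a * 26 ^ s.length + hsg 26 (s.map pvOrd) := by
  induction s with
  | nil => intro a; simp [hsg]
  | cons c t ih =>
    intro a
    rw [List.foldl_cons, ih, List.map_cons]
    simp [hsg]
    ring

theorem horner_hash_eq (s : List Char) :
    horner_hash s = hsg 26 (s.map pvOrd) := by
  unfold horner_hash
  rw [horner_aux]
  simp


/-- Hash of the width-`m2` slice of `s` starting at `j` (what B computes per row). -/
def RH (s : List Char) (m2 j : Nat) : Int := hsg 26 (((s.drop j).take m2).map pvOrd)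

def rowc (text : List String) (i : Nat) : List Char := (text.getD i "").toList

/-- Combined hash of the `m1`-row window starting at row `i`, column `j`. -/
def CH (text : List String) (m1 m2 j i : Nat) : Int :=
  hsg 10 ((List.range m1).map (fun k => RH (rowc text (i + k)) m2 j))

def ind (x y : Int) : Int := if x = y then 1 else 0

def RowL (text : List String) (m2 L0 i : Nat) : List Int :=
  (List.range (L0 + 1)).map (fun j => RH (rowc text i) m2 j)

theorem slice_map (s : List Char) (m2 j : Nat) (h : j + m2 ≤ s.length) :
    ((s.drop j).take m2).map pvOrd
      = (List.range m2).map (fun k => pvOrd (s.getD (j + k) ' ')) := by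
  apply List.ext_getElem
  · simp; omega
  · intro n h1 h2
    simp [List.getElem_take, List.getElem_drop] at h1 ⊢
    congr 1
    rw [List.getElem?_eq_getElem (by omega)]
    simp

theorem RH_zero (s : List Char) (m2 : Nat) : RH s m2 0 = polynomial_hash (s.take m2) := by
  rw [polynomial_hash_eq]; simp [RH]

theorem RH_roll (s : List Char) (m2 j : Nat) (hm : 1 ≤ m2) (hlen : j + 1 + m2 ≤ s.length) :
    RH s m2 (j + 1)
      = polynomial_rolling_hash (RH s m2 j) (s.getD j ' ') (s.getD (j + m2) ' ') m2 := by
  unfold RH polynomial_rolling_hash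
  rw [slice_map s m2 (j + 1) hlen, slice_map s m2 j (by omega)]
  exact hsg_roll 26 (fun j' => pvOrd (s.getD j' ' ')) m2 hm j

theorem map_const_range {A : Type} (n : Nat) (x : A) :
    (List.range n).map (fun _ => x) = List.replicate n x := by
  apply List.ext_getElem <;> simp

theorem row_steps (s : List Char) (m2 L0 : Nat)
    (hc : L0 = 0 ∨ (1 ≤ m2 ∧ L0 + m2 ≤ s.length)) :
    ∀ t, t ≤ L0 →
      (List.range t).foldl
        (fun (rs : List Int × Int) j =>
          (rs.1.set (j + 1) (polynomial_rolling_hash rs.2 (s.getD j ' ') (s.getD (j + m2) ' ') m2),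
           polynomial_rolling_hash rs.2 (s.getD j ' ') (s.getD (j + m2) ' ') m2))
        (RH s m2 0 :: List.replicate L0 0, RH s m2 0)
      = ((List.range (t + 1)).map (fun j => RH s m2 j) ++ List.replicate (L0 - t) 0,
         RH s m2 t) := by
  intro t
  induction t with
  | zero => intro _; simp
  | succ t ih =>
    intro ht
    rw [List.range_succ, List.foldl_append, ih (by omega), List.foldl_cons, List.foldl_nil]
    obtain ⟨hm, hlen⟩ : 1 ≤ m2 ∧ L0 + m2 ≤ s.length := by
      rcases hc with h | h
      · omega
      · exact h
    have hroll : polynomial_rolling_hash (RH s m2 t) (s.getD t ' ') (s.getD (t + m2) ' ') m2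
        = RH s m2 (t + 1) := (RH_roll s m2 t hm (by omega)).symm
    simp only [hroll]
    have hrep : L0 - t = (L0 - (t + 1)) + 1 := by omega
    rw [List.set_append_right _ _ (by simp), hrep, List.replicate_succ]
    simp [List.range_succ]

theorem row_final (s : List Char) (m2 L0 : Nat)
    (hc : L0 = 0 ∨ (1 ≤ m2 ∧ L0 + m2 ≤ s.length)) :
    ((List.range L0).foldl
        (fun (rs : List Int × Int) j =>
          (rs.1.set (j + 1) (polynomial_rolling_hash rs.2 (s.getD j ' ') (s.getD (j + m2) ' ') m2),
           polynomial_rolling_hash rs.2 (s.getD j ' ') (s.getD (j + m2) ' ') m2))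
        ((((List.range (L0 + 1)).map (fun _ => (0 : Int))).set 0 (polynomial_hash (s.take m2))),
         polynomial_hash (s.take m2))).1
      = (List.range (L0 + 1)).map (fun j => RH s m2 j) := by
  rw [← RH_zero, map_const_range, List.replicate_succ]
  have h0 : ((0 : Int) :: List.replicate L0 0).set 0 (RH s m2 0) = RH s m2 0 :: List.replicate L0 0 := rfl
  rw [h0, row_steps s m2 L0 hc L0 (le_refl _)]
  simp

theorem AH_get (text : List String) (m2 L0 n1 i j : Nat) (hi : i < n1) (hj : j < L0 + 1) :
    ((((List.range n1).map (fun i => RowL text m2 L0 i)).getD i []).getD j 0)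
      = RH (rowc text i) m2 j := by
  have h1 : ((List.range n1).map (fun i => RowL text m2 L0 i)).getD i [] = RowL text m2 L0 i := by
    rw [List.getD_eq_getElem _ _ (by simpa using hi)]
    simp
  rw [h1]
  unfold RowL
  rw [List.getD_eq_getElem _ _ (by simpa using hj)]
  simp

theorem CH_roll (text : List String) (m1 m2 j i : Nat) (hm : 1 ≤ m1) :
    CH text m1 m2 j (i + 1)
      = (CH text m1 m2 j i - RH (rowc text i) m2 j * (10 : Int) ^ (m1 - 1)) * 10
        + RH (rowc text (i + m1)) m2 j :=
  hsg_roll 10 (fun i' => RH (rowc text i') m2 j) m1 hm i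

theorem foldl_count (c : Nat → Int) (n : Nat) : ∀ (a : Int),
    (List.range n).foldl (fun o j => o + c j) a = a + ∑ j ∈ Finset.range n, c j := by
  induction n with
  | zero => intro a; simp
  | succ n ih =>
    intro a
    rw [List.range_succ, List.foldl_append, ih, List.foldl_cons, List.foldl_nil,
      Finset.sum_range_succ]
    ring

def PH (pattern : List String) : Int :=
  hsg 10 ((List.range pattern.length).map (fun i => hsg 26 ((pattern.getD i "").toList.map pvOrd)))

theorem CH_zero (text : List String) (m1 m2 j : Nat) :
    CH text m1 m2 j 0 = hsg 10 ((List.range m1).map (fun i => RH (rowc text i) m2 j)) := by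
  unfold CH
  congr 1
  apply List.map_congr_left
  intro k _
  simp

theorem getD_prefix_append {A : Type} (l1 l2 : List A) (t : Nat) (d : A) (ht : l1.length = t) :
    (l1 ++ l2).getD t d = l2.getD 0 d := by
  subst ht
  simp [List.getD_eq_getElem?_getD, List.getElem?_append_right]

theorem mat_steps (text : List String) (m2 L0 : Nat)
    (hc : ∀ i, i < text.length → L0 = 0 ∨ (1 ≤ m2 ∧ L0 + m2 ≤ (text.getD i "").toList.length)) :
    ∀ t, t ≤ text.length →
      (List.range t).foldl
        (fun ah i =>
          ah.set i
            (List.foldl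
                (fun (rs : List Int × Int) j =>
                  (rs.1.set (j + 1)
                      (polynomial_rolling_hash rs.2 ((text.getD i "").toList.getD j ' ')
                        ((text.getD i "").toList.getD (j + m2) ' ') m2),
                    polynomial_rolling_hash rs.2 ((text.getD i "").toList.getD j ' ')
                      ((text.getD i "").toList.getD (j + m2) ' ') m2))
                ((ah.getD i []).set 0 (polynomial_hash (List.take m2 (text.getD i "").toList)),
                  polynomial_hash (List.take m2 (text.getD i "").toList))
                (List.range L0)).1)
        (List.map (fun _ => List.map (fun _ => (0 : Int)) (List.range (L0 + 1))) (List.range text.length))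
      = (List.range t).map (fun i => RowL text m2 L0 i)
          ++ List.replicate (text.length - t) (List.map (fun _ => (0 : Int)) (List.range (L0 + 1))) := by
  intro t
  induction t with
  | zero =>
    intro _
    simp
  | succ t ih =>
    intro ht
    rw [show List.range (t + 1) = List.range t ++ [t] from List.range_succ,
      List.foldl_append, ih (by omega), List.foldl_cons, List.foldl_nil]
    have hget : ((List.range t).map (fun i => RowL text m2 L0 i)
          ++ List.replicate (text.length - t) (List.map (fun _ => (0 : Int)) (List.range (L0 + 1)))).getD t []
        = List.map (fun _ => (0 : Int)) (List.range (L0 + 1)) := by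
      rw [getD_prefix_append _ _ t [] (by simp)]
      have : text.length - t = (text.length - (t + 1)) + 1 := by omega
      rw [this, List.replicate_succ]
      rfl
    rw [hget]
    rw [row_final ((text.getD t "").toList) m2 L0 (hc t (by omega))]
    have hrow : (List.range (L0 + 1)).map (fun j => RH ((text.getD t "").toList) m2 j)
        = RowL text m2 L0 t := rfl
    rw [hrow]
    rw [List.set_append_right _ _ (by simp)]
    have : text.length - t = (text.length - (t + 1)) + 1 := by omega
    rw [this, List.replicate_succ]
    simp [List.range_succ]

theorem ind_if (x y a : Int) : (if x = y then a + 1 else a) = a + ind x y := by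
  unfold ind; split <;> simp

theorem col_steps (text : List String) (m1 m2 L0 n1 : Nat) (ph : Int)
    (hm : 1 ≤ m1) (hn : m1 ≤ n1) (j : Nat) (hj : j < L0 + 1) :
    ∀ t, t ≤ n1 - m1 → ∀ (a0 : Int),
      (List.range t).foldl
        (fun (oc : Int × Int) i =>
          (if (oc.2 - (((List.range n1).map (fun i => RowL text m2 L0 i)).getD i []).getD j 0
                    * (10 : Int) ^ (m1 - 1)) * 10
                + (((List.range n1).map (fun i => RowL text m2 L0 i)).getD (i + m1) []).getD j 0 = ph
           then oc.1 + 1 else oc.1,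
           (oc.2 - (((List.range n1).map (fun i => RowL text m2 L0 i)).getD i []).getD j 0
                    * (10 : Int) ^ (m1 - 1)) * 10
                + (((List.range n1).map (fun i => RowL text m2 L0 i)).getD (i + m1) []).getD j 0))
        (a0, CH text m1 m2 j 0)
      = (a0 + ∑ i ∈ Finset.range t, ind (CH text m1 m2 j (i + 1)) ph, CH text m1 m2 j t) := by
  intro t
  induction t with
  | zero => intro _ a0; simp
  | succ t ih =>
    intro ht a0
    rw [show List.range (t + 1) = List.range t ++ [t] from List.range_succ,
      List.foldl_append, ih (by omega) a0, List.foldl_cons, List.foldl_nil]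
    rw [AH_get text m2 L0 n1 t j (by omega) hj, AH_get text m2 L0 n1 (t + m1) j (by omega) hj,
      ← CH_roll text m1 m2 j t hm, ind_if, Finset.sum_range_succ]
    simp [add_assoc]

theorem AH_final (text : List String) (m2 L0 : Nat)
    (hc : ∀ i, i < text.length → L0 = 0 ∨ (1 ≤ m2 ∧ L0 + m2 ≤ (text.getD i "").toList.length)) :
    (List.range text.length).foldl
        (fun ah i =>
          ah.set i
            (List.foldl
                (fun (rs : List Int × Int) j =>
                  (rs.1.set (j + 1)
                      (polynomial_rolling_hash rs.2 ((text.getD i "").toList.getD j ' ')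
                        ((text.getD i "").toList.getD (j + m2) ' ') m2),
                    polynomial_rolling_hash rs.2 ((text.getD i "").toList.getD j ' ')
                      ((text.getD i "").toList.getD (j + m2) ' ') m2))
                ((ah.getD i []).set 0 (polynomial_hash (List.take m2 (text.getD i "").toList)),
                  polynomial_hash (List.take m2 (text.getD i "").toList))
                (List.range L0)).1)
        (List.map (fun _ => List.map (fun _ => (0 : Int)) (List.range (L0 + 1))) (List.range text.length))
      = (List.range text.length).map (fun i => RowL text m2 L0 i) := by
  rw [mat_steps text m2 L0 hc text.length (le_refl _)]
  simp

theorem phA (pattern : List String) :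
    (List.range pattern.length).foldl
        (fun h i => h + polynomial_hash (pattern.getD i "").toList * (10 : Int) ^ (pattern.length - i - 1)) 0
      = PH pattern := by
  rw [foldl_hsg]
  unfold PH
  simp only [zero_add]
  congr 1
  apply List.map_congr_left
  intro i _
  rw [polynomial_hash_eq]

theorem phB (pattern : List String) :
    (List.range pattern.length).foldl
        (fun h k => h + horner_hash (pattern.getD k "").toList * (10 : Int) ^ (pattern.length - k - 1)) 0
      = PH pattern := by
  rw [foldl_hsg]
  unfold PH
  simp only [zero_add]
  congr 1
  apply List.map_congr_left
  intro i _
  rw [horner_hash_eq]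

theorem A_val (pattern text : List String)
    (hpre : Pre_rabin_karp_algorithm_2D pattern text) :
    rabin_karp_algorithm_2D pattern text
      = ∑ j ∈ Finset.range ((text.getD 0 "").length - (pattern.getD 0 "").length + 1),
          ∑ i ∈ Finset.range (text.length - pattern.length + 1),
            ind (CH text pattern.length (pattern.getD 0 "").length j i) (PH pattern) := by
  obtain ⟨hp, ht, hlen, hm2n2, hrows, hwid⟩ := hpre
  have hm : 1 ≤ pattern.length := by
    cases pattern with
    | nil => exact absurd rfl hp
    | cons a l => simp
  have hc : ∀ i, i < text.length →
      ((text.getD 0 "").length - (pattern.getD 0 "").length) = 0 ∨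
        (1 ≤ (pattern.getD 0 "").length ∧
          ((text.getD 0 "").length - (pattern.getD 0 "").length) + (pattern.getD 0 "").length
            ≤ (text.getD i "").toList.length) := by
    intro i hi
    rcases hwid with h1 | h0
    · right
      refine ⟨h1, ?_⟩
      have hmem : text.getD i "" ∈ text := by
        rw [List.getD_eq_getElem _ _ hi]
        exact List.getElem_mem hi
      have := hrows _ hmem
      have hlt : (text.getD i "").toList.length = (text.getD i "").length := by simp
      omega
    · left; omega
  simp only [rabin_karp_algorithm_2D]
  rw [AH_final text (pattern.getD 0 "").length ((text.getD 0 "").length - (pattern.getD 0 "").length) hc]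
  rw [phA]
  refine Eq.trans (PySem.List.foldl_congr_mem (g := fun (occ : Int) j => occ +
    ∑ i ∈ Finset.range (text.length - pattern.length + 1),
      ind (CH text pattern.length (pattern.getD 0 "").length j i) (PH pattern)) _ _ _ ?_) ?_
  · intro occ j hj
    simp only [List.mem_range] at hj
    have hch0 : (List.range pattern.length).foldl
        (fun ch i => ch + (((List.range text.length).map
            (fun i => RowL text (pattern.getD 0 "").length
              ((text.getD 0 "").length - (pattern.getD 0 "").length) i)).getD i []).getD j 0
          * (10 : Int) ^ (pattern.length - i - 1)) 0
        = CH text pattern.length (pattern.getD 0 "").length j 0 := by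
      refine Eq.trans (PySem.List.foldl_congr_mem (g := fun (ch : Int) i => ch +
        RH (rowc text i) (pattern.getD 0 "").length j
          * (10 : Int) ^ (pattern.length - i - 1)) _ _ _ ?_) ?_
      · intro acc i hi
        simp only [List.mem_range] at hi
        rw [AH_get text (pattern.getD 0 "").length _ text.length i j (by omega) hj]
      · rw [foldl_hsg, CH_zero, zero_add]
    rw [hch0]
    rw [col_steps text pattern.length (pattern.getD 0 "").length
      ((text.getD 0 "").length - (pattern.getD 0 "").length) text.length (PH pattern)
      hm hlen j hj (text.length - pattern.length) (le_refl _)]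
    rw [ind_if]
    simp only [Finset.sum_range_succ']
    ring
  · rw [foldl_count, zero_add]

theorem horner_int (l : List Int) : ∀ (a : Int),
    l.foldl (fun h x => h * 26 + x) a = a * 26 ^ l.length + hsg 26 l := by
  induction l with
  | nil => intro a; simp [hsg]
  | cons x t ih =>
    intro a
    rw [List.foldl_cons, ih, List.length_cons]
    simp [hsg]
    ring

theorem horner_getD (s : List Char) (m2 j : Nat) (hb : j + m2 ≤ s.length) :
    (List.range m2).foldl (fun h q => h * 26 + pvOrd (s.getD (j + q) ' ')) 0 = RH s m2 j := by
  have h1 : (List.range m2).foldl (fun h q => h * 26 + pvOrd (s.getD (j + q) ' ')) 0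
      = ((List.range m2).map (fun q => pvOrd (s.getD (j + q) ' '))).foldl (fun h x => h * 26 + x) 0 := by
    rw [List.foldl_map]
  rw [h1, horner_int]
  unfold RH
  rw [slice_map s m2 j hb]
  simp

theorem B_val (pattern text : List String)
    (hpre : Pre_rabin_karp_algorithm_2D pattern text) :
    rabin_karp_algorithm_2D_alt pattern text
      = ∑ i ∈ Finset.range (text.length - pattern.length + 1),
          ∑ j ∈ Finset.range ((text.getD 0 "").length - (pattern.getD 0 "").length + 1),
            ind (CH text pattern.length (pattern.getD 0 "").length j i) (PH pattern) := by
  obtain ⟨hp, ht, hlen, hm2n2, hrows, _⟩ := hpre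
  simp only [rabin_karp_algorithm_2D_alt]
  rw [phB]
  refine Eq.trans (PySem.List.foldl_congr_mem (g := fun (occ : Int) i => occ +
    ∑ j ∈ Finset.range ((text.getD 0 "").length - (pattern.getD 0 "").length + 1),
      ind (CH text pattern.length (pattern.getD 0 "").length j i) (PH pattern)) _ _ _ ?_) ?_
  · intro occ i hi
    simp only [List.mem_range] at hi
    refine Eq.trans (PySem.List.foldl_congr_mem (g := fun (occ : Int) j => occ +
      ind (CH text pattern.length (pattern.getD 0 "").length j i) (PH pattern)) _ _ _ ?_) ?_
    · intro occ2 j hj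
      simp only [List.mem_range] at hj
      have hh : (List.range pattern.length).foldl
          (fun h k =>
            h + (List.range (pattern.getD 0 "").length).foldl
                  (fun row_hash q => row_hash * 26 + pvOrd ((text.getD (i + k) "").toList.getD (j + q) ' '))
                  0
                * (10 : Int) ^ (pattern.length - k - 1)) 0
          = CH text pattern.length (pattern.getD 0 "").length j i := by
        refine Eq.trans (PySem.List.foldl_congr_mem (g := fun (h : Int) k => h +
          RH (rowc text (i + k)) (pattern.getD 0 "").length j
            * (10 : Int) ^ (pattern.length - k - 1)) _ _ _ ?_) ?_
        · intro acc k hk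
          simp only [List.mem_range] at hk
          have hik : i + k < text.length := by omega
          have hmem : text.getD (i + k) "" ∈ text := by
            rw [List.getD_eq_getElem _ _ hik]
            exact List.getElem_mem hik
          have hrl : (text.getD 0 "").length ≤ (text.getD (i + k) "").length := hrows _ hmem
          have hb : j + (pattern.getD 0 "").length ≤ ((text.getD (i + k) "").toList).length := by
            have : ((text.getD (i + k) "").toList).length = (text.getD (i + k) "").length := by simp
            omega
          rw [horner_getD ((text.getD (i + k) "").toList) (pattern.getD 0 "").length j hb]
          rfl
        · rw [foldl_hsg, zero_add]
          rfl
      rw [hh, ind_if]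
    · rw [foldl_count]
  · rw [foldl_count, zero_add]

-- ===== VERDICT =====
theorem rabin_karp_algorithm_2D_spec : Claim_equal_rabin_karp_algorithm_2D := by
  intro pattern text _ hpre
  unfold Spec_rabin_karp_algorithm_2D
  rw [A_val pattern text hpre, B_val pattern text hpre]
  exact Finset.sum_comm
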